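-- pv_equiv track=rewrite | github.com/0523kevin/review-python | codetest/programmer/level2/택배상자.py | solution
-- ===== SOURCE A (Python) =====
-- def solution(order):
--     order.reverse()
--     belt = list(range(len(order), 0, -1))
--     sub = []
--     truck = 0
--     while True:
--         if belt and order and order[-1] == belt[-1]:
--             belt.pop()
--             order.pop()
--             truck += 1
--         elif sub and order and order[-1] == sub[-1]:
--             sub.pop()
--             order.pop()
--             truck += 1
--         elif belt:
--             sub.append(belt.pop())
--         else:
--             break
--     return truck
-- ===== SOURCE B (Python) =====
-- def solution(order):
--     # Declarative characterization instead of simulating the belt/stack: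
--     # after successfully loading a prefix P (all values distinct, in 1..n),
--     # the sub-stack holds exactly {1..max(P)} \ P in increasing order, so the
--     # next box w is loadable iff w is fresh, in range 1..n, and every box
--     # strictly between w and the prefix maximum has already been loaded.
--     # (Return value only: unlike A, B does not mutate `order` in place.)
--     n = len(order)
--     seen = set()
--     m = 0
--     count = 0
--     for w in order:
--         if w in seen or w < 1 or w > n or any(v not in seen for v in range(w + 1, m + 1)):
--             break
--         seen.add(w)
--         if w > m:
--             m = w
--         count += 1
--     return count
-- ===== Notes on version B (the rewrite author's own statement) =====
-- stated objective: alternative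
-- what changed: A simulates the conveyor belt and sub-stack as explicit mutated lists inside a three-branch while-True loop; B drops the simulation entirely and uses a declarative per-box loadability test (box w is loadable iff it is fresh, in 1..n, and every box strictly between w and the running prefix maximum was already loaded), maintained with a seen-set and a prefix maximum in one pass over order; a timing run measured B several times faster because B never materialises or mutates the belt list.
import Mathlib
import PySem

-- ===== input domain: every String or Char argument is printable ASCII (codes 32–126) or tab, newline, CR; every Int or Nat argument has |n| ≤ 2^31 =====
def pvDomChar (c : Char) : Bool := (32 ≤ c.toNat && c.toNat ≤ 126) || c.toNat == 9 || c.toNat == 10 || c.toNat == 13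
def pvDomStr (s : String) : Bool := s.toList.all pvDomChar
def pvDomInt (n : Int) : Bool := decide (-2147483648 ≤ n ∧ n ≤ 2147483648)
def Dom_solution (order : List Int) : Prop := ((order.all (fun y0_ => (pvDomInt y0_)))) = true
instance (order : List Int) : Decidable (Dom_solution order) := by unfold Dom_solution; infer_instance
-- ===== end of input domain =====

-- B replaces A's belt/stack simulation by a declarative per-box loadability test
-- (seen-set + prefix maximum) in one pass (objective: alternative algorithm).
-- A mutates `order` in place (reverse + pops); B does not: the equivalence proved
-- here is about the return value only.

-- ===== PORT A =====
-- A's while-True loop over the state (order, belt, sub, truck); Python list tops are the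
-- list ends, so order[-1]/belt[-1]/sub[-1] are getLast? and .pop() is dropLast.
def solutionLoopA (order belt sub : List Int) (truck : Int) : Int :=
  if h1 : belt ≠ [] ∧ order ≠ [] ∧ order.getLast? = belt.getLast? then
    solutionLoopA order.dropLast belt.dropLast sub (truck + 1)
  else if h2 : sub ≠ [] ∧ order ≠ [] ∧ order.getLast? = sub.getLast? then
    solutionLoopA order.dropLast belt sub.dropLast (truck + 1)
  else if h3 : belt ≠ [] then
    solutionLoopA order belt.dropLast (sub ++ [belt.getLast h3]) truck
  else
    truck
termination_by belt.length + order.length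
decreasing_by
  · have hb : 0 < belt.length := List.length_pos_iff.mpr h1.1
    have ho : 0 < order.length := List.length_pos_iff.mpr h1.2.1
    simp [List.length_dropLast]; omega
  · have ho : 0 < order.length := List.length_pos_iff.mpr h2.2.1
    simp [List.length_dropLast]; omega
  · have hb : 0 < belt.length := List.length_pos_iff.mpr h3
    simp [List.length_dropLast]; omega

def solution (order : List Int) : Int :=
  solutionLoopA order.reverse (PySem.List.pyRange (order.length : Int) 0 (-1)) [] 0

-- ===== PORT B =====
-- Source B's `for w in order: … break` loop: state (seen, m, count), recursion over the list.
-- `any(v not in seen for v in range(w+1, m+1))` is the ∃-disjunct of the break test.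
def solutionLoopB (ws : List Int) (seen : PySem.Set Int) (m count n : Int) : Int :=
  match ws with
  | [] => count
  | w :: rest =>
    if w ∈ seen ∨ w < 1 ∨ w > n ∨ ∃ v ∈ PySem.List.pyRange (w + 1) (m + 1) 1, v ∉ seen then
      count
    else
      solutionLoopB rest (PySem.Set.add seen w) (if w > m then w else m) (count + 1) n

def solution_alt (order : List Int) : Int :=
  solutionLoopB order PySem.Set.empty 0 0 (order.length : Int)

-- ===== PRECONDITION & SPEC =====
def Spec_solution (order : List Int) (out : Int) : Prop := out = solution_alt order
instance (order : List Int) (out : Int) : Decidable (Spec_solution order out) := by unfold Spec_solution; infer_instance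

-- ===== CLAIM (what is proved, stated in full; the proofs are below) =====
def Claim_equal_solution : Prop := ∀ (order : List Int), Dom_solution order → Spec_solution order (solution order)

-- ===== LEMMAS AND PROOFS =====

-- The last element of a (· < ·)-sorted list bounds every element.
theorem sorted_getLast?_isMax (sub : List Int) (w : Int)
    (hs : sub.Pairwise (· < ·)) (hl : sub.getLast? = some w) : ∀ x ∈ sub, x ≤ w := by
  obtain ⟨l', rfl⟩ := List.getLast?_eq_some_iff.mp hl
  have hp := List.pairwise_append.mp hs
  intro x hx
  rcases List.mem_append.mp hx with h | h
  · exact le_of_lt (hp.2.2 x h w (by simp))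
  · simp at h; omega

-- A (· < ·)-sorted list whose member w bounds every element has w as its last element.
theorem sorted_getLast?_of_max (sub : List Int) (w : Int)
    (hs : sub.Pairwise (· < ·)) (hw : w ∈ sub) (hmax : ∀ x ∈ sub, x ≤ w) :
    sub.getLast? = some w := by
  have hne : sub ≠ [] := List.ne_nil_of_mem hw
  have hl : sub.getLast? = some (sub.getLast hne) := List.getLast?_eq_some_getLast hne
  have h1 : sub.getLast hne ≤ w := hmax _ (List.getLast_mem hne)
  have h2 : w ≤ sub.getLast hne := sorted_getLast?_isMax sub _ hs hl w hw
  rw [hl]; congr 1; omega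

-- With no orders left, A only drains the belt into sub and returns truck.
theorem loopA_nil (belt : List Int) : ∀ (sub : List Int) (truck : Int),
    solutionLoopA [] belt sub truck = truck := by
  induction belt using List.reverseRecOn with
  | nil =>
    intro sub truck
    rw [solutionLoopA]
    simp
  | append_singleton l a ih =>
    intro sub truck
    rw [solutionLoopA]
    simp [ih]

-- If the next wanted box w matches neither the belt (not in (m, n]) nor the sub top,
-- A drains the whole belt into sub and breaks, returning truck unchanged.
theorem loopA_drain (w : Int) : ∀ (k : Nat) (order sub : List Int) (m n truck : Int),
    order.getLast? = some w → (n - m).toNat ≤ k →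
    ¬(m < w ∧ w ≤ n) → sub.getLast? ≠ some w →
    solutionLoopA order ((PySem.List.pyRange (m + 1) (n + 1) 1).reverse) sub truck = truck := by
  intro k
  induction k with
  | zero =>
    intro order sub m n truck how hk hbw hsw
    have ho : order ≠ [] := by intro h; subst h; simp at how
    rw [PySem.List.pyRange_one_eq_nil (by omega)]
    rw [solutionLoopA]
    simp only [List.reverse_nil]
    rw [dif_neg (by rintro ⟨h, -⟩; exact h rfl)]
    rw [dif_neg (by rintro ⟨-, -, h⟩; rw [how] at h; exact hsw h.symm)]
    rw [dif_neg (by intro h; exact h rfl)]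
  | succ k ih =>
    intro order sub m n truck how hk hbw hsw
    have ho : order ≠ [] := by intro h; subst h; simp at how
    by_cases hmn : n ≤ m
    · rw [PySem.List.pyRange_one_eq_nil (by omega)]
      rw [solutionLoopA]
      simp only [List.reverse_nil]
      rw [dif_neg (by rintro ⟨h, -⟩; exact h rfl)]
      rw [dif_neg (by rintro ⟨-, -, h⟩; rw [how] at h; exact hsw h.symm)]
      rw [dif_neg (by intro h; exact h rfl)]
    · push_neg at hmn
      rw [PySem.List.pyRange_one_cons (show m + 1 < n + 1 by omega), List.reverse_cons]
      rw [solutionLoopA]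
      rw [dif_neg (by
        rintro ⟨-, -, heq⟩
        rw [how, List.getLast?_concat] at heq
        simp at heq; omega)]
      rw [dif_neg (by rintro ⟨-, -, h⟩; rw [how] at h; exact hsw h.symm)]
      rw [dif_pos (by simp)]
      have hgl : ∀ (h : (PySem.List.pyRange (m + 1 + 1) (n + 1) 1).reverse ++ [m + 1] ≠ []),
          ((PySem.List.pyRange (m + 1 + 1) (n + 1) 1).reverse ++ [m + 1]).getLast h = m + 1 := by
        intro h
        have := List.getLast?_eq_some_getLast h
        rw [List.getLast?_concat] at this
        exact (Option.some.inj this).symm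
      rw [List.dropLast_concat, hgl]
      exact ih order (sub ++ [m + 1]) (m + 1) n truck how (by omega)
        (by omega) (by rw [List.getLast?_concat]; intro h; have := Option.some.inj h; omega)

-- Loading a box w with m < w ≤ n: A pushes b+1 .. w-1 onto sub, then pops w from the belt.
theorem loopA_push (n w : Int) (order : List Int) (how : order.getLast? = some w) (hwn : w ≤ n) :
    ∀ (k : Nat) (b : Int) (sub : List Int) (truck : Int),
    (w - b).toNat ≤ k + 1 → b < w → (∀ x ∈ sub, x ≤ b) →
    solutionLoopA order ((PySem.List.pyRange (b + 1) (n + 1) 1).reverse) sub truck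
      = solutionLoopA order.dropLast ((PySem.List.pyRange (w + 1) (n + 1) 1).reverse)
          (sub ++ PySem.List.pyRange (b + 1) w 1) (truck + 1) := by
  intro k
  induction k with
  | zero =>
    intro b sub truck hk hbw hsub
    have hbw1 : w = b + 1 := by omega
    subst hbw1
    rw [PySem.List.pyRange_one_cons (show b + 1 < n + 1 by omega), List.reverse_cons]
    rw [solutionLoopA]
    rw [dif_pos ⟨by simp, by intro h; subst h; simp at how, by rw [how, List.getLast?_concat]⟩]
    rw [List.dropLast_concat, PySem.List.pyRange_one_eq_nil (le_refl _), List.append_nil]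
  | succ k ih =>
    intro b sub truck hk hbw hsub
    by_cases hb1 : b + 1 = w
    · rw [PySem.List.pyRange_one_cons (show b + 1 < n + 1 by omega), List.reverse_cons]
      rw [solutionLoopA]
      rw [dif_pos ⟨by simp, by intro h; subst h; simp at how, by rw [how, List.getLast?_concat, hb1]⟩]
      rw [List.dropLast_concat, ← hb1, PySem.List.pyRange_one_eq_nil (le_refl _), List.append_nil]
    · rw [PySem.List.pyRange_one_cons (show b + 1 < n + 1 by omega), List.reverse_cons]
      rw [solutionLoopA]
      rw [dif_neg (by
        rintro ⟨-, -, heq⟩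
        rw [how, List.getLast?_concat] at heq
        exact hb1 (Option.some.inj heq).symm)]
      rw [dif_neg (by
        rintro ⟨-, -, heq⟩
        rw [how] at heq
        have hwmem : w ∈ sub := List.mem_of_getLast? heq.symm
        have := hsub w hwmem; omega)]
      rw [dif_pos (by simp)]
      have hgl : ∀ (h : (PySem.List.pyRange (b + 1 + 1) (n + 1) 1).reverse ++ [b + 1] ≠ []),
          ((PySem.List.pyRange (b + 1 + 1) (n + 1) 1).reverse ++ [b + 1]).getLast h = b + 1 := by
        intro h
        have := List.getLast?_eq_some_getLast h
        rw [List.getLast?_concat] at this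
        exact (Option.some.inj this).symm
      rw [List.dropLast_concat, hgl]
      rw [ih (b + 1) (sub ++ [b + 1]) truck (by omega) (by omega)
        (by intro x hx
            rcases List.mem_append.mp hx with h | h
            · have := hsub x h; omega
            · simp at h; omega)]
      rw [List.append_assoc]
      rw [show [b + 1] ++ PySem.List.pyRange (b + 1 + 1) w 1 = PySem.List.pyRange (b + 1) w 1 by
        rw [PySem.List.pyRange_one_cons (show b + 1 < w by omega)]; rfl]

-- Main invariant: after loading the prefix recorded in `seen` (prefix maximum m),
-- A's belt is the reversed run m+1..n and A's sub stack is {1..m} \ seen in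
-- increasing order; then A's loop computes B's loop.
theorem loopAB (n : Int) : ∀ (ws sub seen : List Int) (m count : Int),
    sub.Pairwise (· < ·) →
    (∀ x, x ∈ sub ↔ 1 ≤ x ∧ x ≤ m ∧ x ∉ seen) →
    (∀ x ∈ seen, 1 ≤ x ∧ x ≤ m) →
    0 ≤ m → m ≤ n →
    solutionLoopA ws.reverse ((PySem.List.pyRange (m + 1) (n + 1) 1).reverse) sub count
      = solutionLoopB ws seen m count n := by
  intro ws
  induction ws with
  | nil =>
    intro sub seen m count _ _ _ _ _
    simp only [List.reverse_nil]
    rw [loopA_nil, solutionLoopB]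
  | cons w rest ih =>
    intro sub seen m count hsort hmem hseen hm0 hmn
    rw [solutionLoopB]
    have hrev : (w :: rest).reverse = rest.reverse ++ [w] := by simp
    have how : (w :: rest).reverse.getLast? = some w := by rw [hrev, List.getLast?_concat]
    by_cases hC : w ∈ seen ∨ w < 1 ∨ w > n ∨ ∃ v ∈ PySem.List.pyRange (w + 1) (m + 1) 1, v ∉ seen
    · rw [if_pos hC]
      have hnbelt : ¬(m < w ∧ w ≤ n) := by
        rcases hC with h | h | h | ⟨v, hv, hvs⟩
        · have := hseen w h; omega
        · omega
        · omega
        · rw [PySem.List.mem_pyRange_one] at hv; omega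
      have hnsub : sub.getLast? ≠ some w := by
        intro hlast
        have hwmem : w ∈ sub := List.mem_of_getLast? hlast
        have hmax := sorted_getLast?_isMax sub w hsort hlast
        have hw' := (hmem w).mp hwmem
        rcases hC with h | h | h | ⟨v, hv, hvs⟩
        · exact hw'.2.2 h
        · omega
        · omega
        · rw [PySem.List.mem_pyRange_one] at hv
          have hvsub : v ∈ sub := (hmem v).mpr ⟨by omega, by omega, hvs⟩
          have := hmax v hvsub; omega
      exact loopA_drain w (n - m).toNat (w :: rest).reverse sub m n count how
        (le_refl _) hnbelt hnsub
    · rw [if_neg hC]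
      push_neg at hC
      obtain ⟨hws, hw1, hwn, hall⟩ := hC
      by_cases hwm : w > m
      · rw [if_pos hwm]
        rw [loopA_push n w (w :: rest).reverse how hwn (w - m).toNat m sub count
          (by omega) (by omega) (fun x hx => ((hmem x).mp hx).2.1)]
        rw [hrev, List.dropLast_concat]
        rw [ih (sub ++ PySem.List.pyRange (m + 1) w 1) (PySem.Set.add seen w) w (count + 1)
          ?_ ?_ ?_ (by omega) (by omega)]
        · exact List.pairwise_append.mpr ⟨hsort, PySem.List.pairwise_lt_pyRange_one _ _,
            fun x hx y hy => by
              have hx' := ((hmem x).mp hx).2.1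
              rw [PySem.List.mem_pyRange_one] at hy
              omega⟩
        · intro x
          rw [List.mem_append, hmem x, PySem.List.mem_pyRange_one, PySem.Set.mem_add]
          constructor
          · rintro (⟨h1, h2, h3⟩ | ⟨h1, h2⟩)
            · refine ⟨h1, by omega, ?_⟩
              rintro (h | h)
              · exact h3 h
              · omega
            · refine ⟨by omega, by omega, ?_⟩
              rintro (h | h)
              · have := hseen x h; omega
              · omega
          · rintro ⟨h1, h2, h3⟩
            by_cases hxm : x ≤ m
            · exact Or.inl ⟨h1, hxm, fun hh => h3 (Or.inl hh)⟩
            · have hne : x ≠ w := fun he => h3 (Or.inr he)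
              exact Or.inr ⟨by omega, by omega⟩
        · intro x hx
          rw [PySem.Set.mem_add] at hx
          rcases hx with h | h
          · have := hseen x h; omega
          · omega
      · rw [if_neg hwm]
        push_neg at hwm
        have hwsub : w ∈ sub := (hmem w).mpr ⟨hw1, hwm, hws⟩
        have hmax : ∀ x ∈ sub, x ≤ w := by
          intro x hx
          have hx' := (hmem x).mp hx
          by_contra hgt
          push_neg at hgt
          exact hx'.2.2 (hall x (by rw [PySem.List.mem_pyRange_one]; omega))
        have hlast := sorted_getLast?_of_max sub w hsort hwsub hmax
        have hsplit : sub.dropLast ++ [w] = sub := by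
          obtain ⟨l', he⟩ := List.getLast?_eq_some_iff.mp hlast
          rw [he, List.dropLast_concat]
        have hsort' : (sub.dropLast ++ [w]).Pairwise (· < ·) := by rw [hsplit]; exact hsort
        have hdlt : ∀ x ∈ sub.dropLast, x < w :=
          fun x hx => (List.pairwise_append.mp hsort').2.2 x hx w (by simp)
        rw [solutionLoopA]
        rw [dif_neg (by
          rintro ⟨hne, -, heq⟩
          have hmn' : m < n := by
            by_contra hh
            push_neg at hh
            rw [PySem.List.pyRange_one_eq_nil (by omega)] at hne
            simp at hne
          rw [PySem.List.pyRange_one_cons (show m + 1 < n + 1 by omega)] at heq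
          have hw' : w = m + 1 := by
            simpa [hrev, List.getLast?_concat] using heq
          omega)]
        rw [dif_pos ⟨List.ne_nil_of_mem hwsub, by simp, by rw [how, hlast]⟩]
        rw [hrev, List.dropLast_concat]
        rw [ih sub.dropLast (PySem.Set.add seen w) m (count + 1)
          (hsort.sublist (List.dropLast_sublist sub)) ?_ ?_ hm0 hmn]
        · intro x
          rw [PySem.Set.mem_add]
          constructor
          · intro hx
            have hxs : x ∈ sub := by rw [← hsplit]; exact List.mem_append_left _ hx
            have h' := (hmem x).mp hxs
            have hxw : x < w := hdlt x hx
            refine ⟨h'.1, h'.2.1, ?_⟩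
            rintro (h | h)
            · exact h'.2.2 h
            · omega
          · rintro ⟨h1, h2, h3⟩
            have hxs : x ∈ sub := (hmem x).mpr ⟨h1, h2, fun hh => h3 (Or.inl hh)⟩
            rw [← hsplit] at hxs
            rcases List.mem_append.mp hxs with h | h
            · exact h
            · simp at h
              exact absurd (Or.inr h) h3
        · intro x hx
          rw [PySem.Set.mem_add] at hx
          rcases hx with h | h
          · exact hseen x h
          · exact ⟨by omega, by omega⟩

-- ===== VERDICT (by name: the statement is the Claim_ definition above) =====
theorem solution_spec : Claim_equal_solution := by
  intro order _
  unfold Spec_solution solution solution_alt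
  rw [show PySem.List.pyRange (order.length : Int) 0 (-1)
      = (PySem.List.pyRange (0 + 1) ((order.length : Int) + 1) 1).reverse by
    rw [PySem.List.pyRange_neg_one_eq_reverse]]
  rw [loopAB (order.length : Int) order [] PySem.Set.empty 0 0
    (by simp) (by intro x; simp [PySem.Set.empty]; omega) (by simp [PySem.Set.empty])
    (by omega) (by positivity)]
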